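-- pv_equiv track=rewrite | github.com/rmshimomura/RSA-Cryptography-MPrime | RSANPrime.py | encontrarE
-- ===== SOURCE A (Python) =====
-- import math
--
-- def phiN(primes, nOP):
--     aux = 1
--     for i in range(nOP):
--         aux *= (primes[i] - 1)
--     return aux
--
-- def encontrarE(primes, nOP):
--     count = 2
--     while True:
--         if(math.gcd(count, phiN(primes, nOP)) == 1):
--             break
--         else:
--             count = count + 1
--     return count
-- ===== SOURCE B (Python) =====
-- import math
--
-- def encontrarE(primes, nOP):
--     count = 2
--     while not all(math.gcd(count, primes[i] - 1) == 1 for i in range(nOP)):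
--         count = count + 1
--     return count
-- ===== Notes on version B (the rewrite author's own statement) =====
-- stated objective: simpler
-- what changed: B never forms the totient product: instead of recomputing the full product of (p-1) factors on every candidate and taking one big gcd, it tests each candidate for coprimality against every factor individually with all(), using gcd(c, prod) == 1 iff gcd(c, p_i - 1) == 1 for all i.
import Mathlib
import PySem

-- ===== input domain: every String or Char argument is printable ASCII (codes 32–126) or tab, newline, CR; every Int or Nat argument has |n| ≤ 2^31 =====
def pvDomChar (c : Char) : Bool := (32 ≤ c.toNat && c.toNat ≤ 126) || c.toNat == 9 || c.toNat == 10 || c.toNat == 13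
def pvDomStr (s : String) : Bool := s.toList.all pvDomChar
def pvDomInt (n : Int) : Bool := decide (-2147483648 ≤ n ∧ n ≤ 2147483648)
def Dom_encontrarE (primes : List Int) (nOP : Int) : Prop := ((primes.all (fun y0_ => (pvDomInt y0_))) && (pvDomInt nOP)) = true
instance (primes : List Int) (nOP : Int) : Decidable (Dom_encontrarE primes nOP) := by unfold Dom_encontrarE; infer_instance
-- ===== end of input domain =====

-- B tests each candidate against every totient factor individually (all gcds = 1) instead of
-- forming the totient product and taking one big gcd; objective: simpler (no big product).


-- ===== PORT A =====
-- phiN: aux = 1; for i in range(nOP): aux *= primes[i] - 1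
def phiN (primes : List Int) (nOP : Int) : Int :=
  (PySem.List.pyRange 0 nOP 1).foldl (fun aux i => aux * (PySem.List.pyGetD primes i 0 - 1)) 1

-- the 'while True' loop of A; the Nat argument is a fuel guard only (Pre_ guarantees it suffices)
def encontrarELoop (phi : Int) : Nat → Int → Int
  | 0, count => count
  | n+1, count => if Int.gcd count phi = 1 then count else encontrarELoop phi n (count + 1)

def encontrarE (primes : List Int) (nOP : Int) : Int :=
  encontrarELoop (phiN primes nOP) ((phiN primes nOP).natAbs + 1) 2

-- ===== PORT B =====
-- all(math.gcd(count, primes[i] - 1) == 1 for i in range(nOP))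
def altOk (primes : List Int) (nOP : Int) (count : Int) : Bool :=
  (PySem.List.pyRange 0 nOP 1).all (fun i => Int.gcd count (PySem.List.pyGetD primes i 0 - 1) == 1)

-- fuel guard for B's while loop (Pre_ guarantees it suffices)
def altFuel (primes : List Int) (nOP : Int) : Nat :=
  (PySem.List.pyRange 0 nOP 1).foldl (fun a i => a * (PySem.List.pyGetD primes i 0 - 1).natAbs) 1 + 1

def encontrarEAltLoop (primes : List Int) (nOP : Int) : Nat → Int → Int
  | 0, count => count
  | n+1, count =>
      if altOk primes nOP count then count else encontrarEAltLoop primes nOP n (count + 1)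

def encontrarE_alt (primes : List Int) (nOP : Int) : Int :=
  encontrarEAltLoop primes nOP (altFuel primes nOP) 2

-- ===== PRECONDITION & SPEC =====
-- Pre_ excludes nOP > len(primes) (both programs raise IndexError) and a 1 among the first nOP
-- primes (the totient product is 0, gcd(count,0)=count is never 1, so both programs loop forever).
def Pre_encontrarE (primes : List Int) (nOP : Int) : Prop :=
  nOP ≤ (primes.length : Int) ∧ ∀ x ∈ primes.take nOP.toNat, x ≠ 1
instance (primes : List Int) (nOP : Int) : Decidable (Pre_encontrarE primes nOP) := by
  unfold Pre_encontrarE; infer_instance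

def pvWitness_encontrarE : List Int × Int := ([3, 5], 2)

def Spec_encontrarE (primes : List Int) (nOP : Int) (out : Int) : Prop := out = encontrarE_alt primes nOP
instance (primes : List Int) (nOP : Int) (out : Int) : Decidable (Spec_encontrarE primes nOP out) := by unfold Spec_encontrarE; infer_instance

-- ===== CLAIM (what is proved, stated in full; the proofs are below) =====
def Claim_equal_encontrarE : Prop := ∀ (primes : List Int) (nOP : Int), Dom_encontrarE primes nOP → Pre_encontrarE primes nOP → Spec_encontrarE primes nOP (encontrarE primes nOP)

-- ===== LEMMAS AND PROOFS =====

-- the list of totient factors both programs range over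
def pvFactors (primes : List Int) (nOP : Int) : List Int :=
  (PySem.List.pyRange 0 nOP 1).map (fun i => PySem.List.pyGetD primes i 0 - 1)

theorem phiN_eq_foldl (primes : List Int) (nOP : Int) :
    phiN primes nOP = (pvFactors primes nOP).foldl (· * ·) 1 := by
  simp [phiN, pvFactors, List.foldl_map]

theorem altOk_eq_all (primes : List Int) (nOP : Int) (c : Int) :
    altOk primes nOP c = (pvFactors primes nOP).all (fun f => Int.gcd c f == 1) := by
  simp only [altOk, pvFactors, List.all_map, Function.comp_def]

theorem altFuel_eq_foldl (primes : List Int) (nOP : Int) :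
    altFuel primes nOP = (pvFactors primes nOP).foldl (fun a f => a * f.natAbs) 1 + 1 := by
  simp [altFuel, pvFactors, List.foldl_map]

theorem gcd_mul_eq_one (c a b : Int) :
    Int.gcd c (a * b) = 1 ↔ (Int.gcd c a = 1 ∧ Int.gcd c b = 1) := by
  unfold Int.gcd
  rw [Int.natAbs_mul]
  exact Nat.coprime_mul_iff_right

theorem gcd_foldl_eq_one (c : Int) (fs : List Int) :
    ∀ a : Int, (Int.gcd c (fs.foldl (· * ·) a) = 1 ↔
      (Int.gcd c a = 1 ∧ ∀ f ∈ fs, Int.gcd c f = 1)) := by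
  induction fs with
  | nil => intro a; simp
  | cons f fs ih =>
      intro a
      simp only [List.foldl_cons, ih (a * f), gcd_mul_eq_one, List.mem_cons]
      constructor
      · rintro ⟨⟨h1, h2⟩, h3⟩
        exact ⟨h1, fun g hg => by rcases hg with rfl | hg; exact h2; exact h3 g hg⟩
      · rintro ⟨h1, h2⟩
        exact ⟨⟨h1, h2 f (Or.inl rfl)⟩, fun g hg => h2 g (Or.inr hg)⟩

theorem natAbs_foldl (fs : List Int) :
    ∀ a : Int, fs.foldl (fun x f => x * f.natAbs) a.natAbs = (fs.foldl (· * ·) a).natAbs := by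
  induction fs with
  | nil => intro a; rfl
  | cons f fs ih =>
      intro a
      simpa [← Int.natAbs_mul] using ih (a * f)

theorem foldl_mul_ne_zero (fs : List Int) (h : ∀ f ∈ fs, f ≠ 0) :
    ∀ a : Int, a ≠ 0 → fs.foldl (· * ·) a ≠ 0 := by
  induction fs with
  | nil => intro a ha; simpa using ha
  | cons f fs ih =>
      intro a ha
      simp only [List.foldl_cons]
      exact ih (fun g hg => h g (List.mem_cons_of_mem _ hg)) _
        (mul_ne_zero ha (h f List.mem_cons_self))

theorem factors_ne_zero (primes : List Int) (nOP : Int)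
    (hpre : Pre_encontrarE primes nOP) :
    ∀ f ∈ pvFactors primes nOP, f ≠ 0 := by
  obtain ⟨hlen, hone⟩ := hpre
  intro f hf
  simp only [pvFactors, List.mem_map] at hf
  obtain ⟨i, hi, rfl⟩ := hf
  rw [PySem.List.mem_pyRange_one] at hi
  obtain ⟨h0, hn⟩ := hi
  have hilen : i < (primes.length : Int) := lt_of_lt_of_le hn hlen
  have hlt : i.toNat < primes.length := by omega
  rw [PySem.List.pyGetD_eq_getElem primes 0 h0 hilen]
  have hmem : primes[i.toNat] ∈ primes.take nOP.toNat := by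
    rw [List.mem_take_iff_getElem]
    exact ⟨i.toNat, by omega, by congr 1⟩
  have := hone _ hmem
  omega

-- both loops return the same value given a coprime candidate within both fuels
theorem loops_eq (primes : List Int) (nOP : Int) (phi : Int)
    (hok : ∀ c : Int, altOk primes nOP c = true ↔ Int.gcd c phi = 1) :
    ∀ (k n m : Nat) (count : Int), k < n → k < m →
      Int.gcd (count + (k : Int)) phi = 1 →
      encontrarELoop phi n count = encontrarEAltLoop primes nOP m count := by
  intro k
  induction k with
  | zero =>
      intro n m count hn hm hg
      obtain ⟨n', rfl⟩ := Nat.exists_eq_succ_of_ne_zero (by omega : n ≠ 0)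
      obtain ⟨m', rfl⟩ := Nat.exists_eq_succ_of_ne_zero (by omega : m ≠ 0)
      have hg' : Int.gcd count phi = 1 := by simpa using hg
      simp [encontrarELoop, encontrarEAltLoop, hg', (hok count).mpr hg']
  | succ k ih =>
      intro n m count hn hm hg
      obtain ⟨n', rfl⟩ := Nat.exists_eq_succ_of_ne_zero (by omega : n ≠ 0)
      obtain ⟨m', rfl⟩ := Nat.exists_eq_succ_of_ne_zero (by omega : m ≠ 0)
      simp only [encontrarELoop, encontrarEAltLoop]
      by_cases hc : Int.gcd count phi = 1
      · simp [hc, (hok count).mpr hc]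
      · have hb : altOk primes nOP count = false := by
          cases h : altOk primes nOP count
          · rfl
          · exact absurd ((hok count).mp h) hc
        rw [if_neg hc, hb]
        simp only [Bool.false_eq_true, if_false]
        apply ih n' m' (count + 1) (by omega) (by omega)
        have hco : count + 1 + (k : Int) = count + ((k + 1 : Nat) : Int) := by push_cast; ring
        rw [hco]
        exact hg

-- ===== VERDICT (by name: the statement is the Claim_ definition above) =====
theorem encontrarE_spec : Claim_equal_encontrarE := by
  intro primes nOP _ hpre
  unfold Spec_encontrarE
  have hok : ∀ c : Int, altOk primes nOP c = true ↔ Int.gcd c (phiN primes nOP) = 1 := by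
    intro c
    rw [altOk_eq_all, phiN_eq_foldl, gcd_foldl_eq_one c (pvFactors primes nOP) 1]
    simp [List.all_eq_true, Int.gcd]
  have hnz : phiN primes nOP ≠ 0 := by
    rw [phiN_eq_foldl]
    exact foldl_mul_ne_zero (pvFactors primes nOP) (factors_ne_zero primes nOP hpre) 1 one_ne_zero
  have habs : 1 ≤ (phiN primes nOP).natAbs := by omega
  have hfuel : altFuel primes nOP = (phiN primes nOP).natAbs + 1 := by
    rw [altFuel_eq_foldl, phiN_eq_foldl]
    have h := natAbs_foldl (pvFactors primes nOP) 1
    simp only [Int.natAbs_one] at h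
    rw [h]
  have hwit : Int.gcd ((2 : Int) + (((phiN primes nOP).natAbs - 1 : Nat) : Int))
      (phiN primes nOP) = 1 := by
    have h2 : (2 : Int) + (((phiN primes nOP).natAbs - 1 : Nat) : Int)
        = ((phiN primes nOP).natAbs : Int) + 1 := by push_cast [habs]; omega
    rw [h2]
    unfold Int.gcd
    have h3 : (((phiN primes nOP).natAbs : Int) + 1).natAbs = (phiN primes nOP).natAbs + 1 := by
      omega
    rw [h3]
    simp
  show encontrarELoop (phiN primes nOP) ((phiN primes nOP).natAbs + 1) 2
      = encontrarEAltLoop primes nOP (altFuel primes nOP) 2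
  rw [hfuel]
  exact loops_eq primes nOP (phiN primes nOP) hok ((phiN primes nOP).natAbs - 1)
    ((phiN primes nOP).natAbs + 1) ((phiN primes nOP).natAbs + 1) 2 (by omega) (by omega) hwit
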